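-- pv_equiv track=rewrite | github.com/eroge-69/PyToExe | python-files/PDF-Extract-Test.py | calculate_end_pages
-- ===== SOURCE A (Python) =====
-- def calculate_end_pages(found_pages, total_pages):
--     end_pages = []
--     i = 0
--     while i < len(found_pages):
--         found_page = found_pages[i]
--         if found_page is None:
--             end_pages.append(None)
--             i += 1
--             continue
--         if i + 1 < len(found_pages):
--             j = i + 1
--             while j < len(found_pages) and found_pages[j] is None:
--                 j += 1
--             end_page = found_pages[j] - 1 if j < len(found_pages) else total_pages
--         else:
--             end_page = total_pages
--         end_pages.append(end_page)
--         i += 1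
--     return end_pages
-- ===== SOURCE B (Python) =====
-- def calculate_end_pages(found_pages, total_pages):
--     # single backward pass: nxt tracks the nearest non-None value to the right
--     nxt = None
--     out = []
--     for p in reversed(found_pages):
--         if p is None:
--             out.append(None)
--         else:
--             out.append(total_pages if nxt is None else nxt - 1)
--             nxt = p
--     out.reverse()
--     return out
-- ===== Notes on version B (the rewrite author's own statement) =====
-- stated objective: faster
-- what changed: Replaces the forward scan with an inner look-ahead while-loop by a single backward pass that carries the nearest non-None value to the right in an accumulator.
import Mathlib
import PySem

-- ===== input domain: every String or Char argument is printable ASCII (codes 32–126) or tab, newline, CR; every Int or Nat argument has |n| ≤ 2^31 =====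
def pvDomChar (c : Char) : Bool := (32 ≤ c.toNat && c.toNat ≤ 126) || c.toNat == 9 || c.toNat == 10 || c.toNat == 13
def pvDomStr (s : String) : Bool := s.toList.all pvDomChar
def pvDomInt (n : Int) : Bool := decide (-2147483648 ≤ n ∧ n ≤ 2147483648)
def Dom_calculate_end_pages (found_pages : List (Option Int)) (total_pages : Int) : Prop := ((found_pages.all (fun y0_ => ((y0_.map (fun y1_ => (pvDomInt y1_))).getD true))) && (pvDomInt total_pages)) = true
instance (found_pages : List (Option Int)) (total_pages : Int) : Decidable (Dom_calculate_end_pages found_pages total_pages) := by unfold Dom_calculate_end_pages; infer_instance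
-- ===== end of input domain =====

-- B replaces A's forward scan with an inner look-ahead loop by one backward pass
-- carrying the nearest non-None value to the right (objective: alternative algorithm).


-- ===== PORT A =====
-- A's inner while loop: from position i+1 skip Nones; found_pages[j]-1 if j in range else total_pages
def pvAInner (rest : List (Option Int)) (total_pages : Int) : Int :=
  match rest with
  | [] => total_pages
  | none :: t => pvAInner t total_pages
  | some v :: _ => v - 1

-- A's outer while over i, one step per element (the suffix from i is the match scrutinee)
def calculate_end_pages (found_pages : List (Option Int)) (total_pages : Int) : List (Option Int) :=
  match found_pages with
  | [] => []
  | none :: t => none :: calculate_end_pages t total_pages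
  | some _ :: t => some (pvAInner t total_pages) :: calculate_end_pages t total_pages

-- ===== PORT B =====
-- backward pass (Python's reversed-for + final reverse = a foldr over the list), state = (nxt, out)
def calculate_end_pages_alt (found_pages : List (Option Int)) (total_pages : Int) : List (Option Int) :=
  (found_pages.foldr
    (fun p (st : Option Int × List (Option Int)) =>
      match p with
      | none => (st.1, none :: st.2)
      | some v => (some v, (some (match st.1 with | none => total_pages | some n => n - 1)) :: st.2))
    (none, [])).2

-- ===== PRECONDITION & SPEC =====
def Spec_calculate_end_pages (found_pages : List (Option Int)) (total_pages : Int) (out : List (Option Int)) : Prop := out = calculate_end_pages_alt found_pages total_pages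
instance (found_pages : List (Option Int)) (total_pages : Int) (out : List (Option Int)) : Decidable (Spec_calculate_end_pages found_pages total_pages out) := by unfold Spec_calculate_end_pages; infer_instance

-- ===== CLAIM (what is proved, stated in full; the proofs are below) =====
def Claim_equal_calculate_end_pages : Prop := ∀ (found_pages : List (Option Int)) (total_pages : Int), Dom_calculate_end_pages found_pages total_pages → Spec_calculate_end_pages found_pages total_pages (calculate_end_pages found_pages total_pages)

-- ===== LEMMAS AND PROOFS =====
-- first non-None value of the list (what B's nxt accumulator equals after processing a suffix)
def pvFirstSome (l : List (Option Int)) : Option Int :=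
  match l with
  | [] => none
  | none :: t => pvFirstSome t
  | some v :: _ => some v

theorem pvAInner_eq (l : List (Option Int)) (tp : Int) :
    pvAInner l tp = (match pvFirstSome l with | none => tp | some n => n - 1) := by
  induction l with
  | nil => rfl
  | cons h t ih => cases h <;> simp [pvAInner, pvFirstSome, ih]

theorem pvFold_invariant (l : List (Option Int)) (tp : Int) :
    (l.foldr
      (fun p (st : Option Int × List (Option Int)) =>
        match p with
        | none => (st.1, none :: st.2)
        | some v => (some v, (some (match st.1 with | none => tp | some n => n - 1)) :: st.2))
      (none, []))
    = (pvFirstSome l, calculate_end_pages l tp) := by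
  induction l with
  | nil => rfl
  | cons h t ih =>
    cases h with
    | none => simp [List.foldr, ih, pvFirstSome, calculate_end_pages]
    | some v =>
      simp only [List.foldr, ih, pvFirstSome, calculate_end_pages]
      simp [pvAInner_eq]

-- ===== VERDICT (by name: the statement is the Claim_ definition above) =====
theorem calculate_end_pages_spec : Claim_equal_calculate_end_pages := by
  intro fp tp _
  unfold Spec_calculate_end_pages calculate_end_pages_alt
  rw [pvFold_invariant]
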